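-- pv_equiv track=rewrite | github.com/muhammadsidd/DataScience | studies/tester.py | solution
-- ===== SOURCE A (Python) =====
-- def solution(N):
--     # write your code in Python 3.6
--     if (N < 10):
--         return 0
--     i = 0
--
--     while N >= 10:
--         N = N // 10
--         i += 1
--     temp = 1
--
--     for j in range(0, i):
--         temp *= 10
--
--     return temp
-- ===== SOURCE B (Python) =====
-- def solution(N):
--     # write your code in Python 3.6
--     if N < 10:
--         return 0
--     return 10 ** (len(str(N)) - 1)
-- ===== Notes on version B (the rewrite author's own statement) =====
-- stated objective: idiomatic
-- what changed: Replaced the division-based digit-count loop and the multiplication-based power loop with a single closed-form expression: ten raised to one less than the length of str(N).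
import Mathlib
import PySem

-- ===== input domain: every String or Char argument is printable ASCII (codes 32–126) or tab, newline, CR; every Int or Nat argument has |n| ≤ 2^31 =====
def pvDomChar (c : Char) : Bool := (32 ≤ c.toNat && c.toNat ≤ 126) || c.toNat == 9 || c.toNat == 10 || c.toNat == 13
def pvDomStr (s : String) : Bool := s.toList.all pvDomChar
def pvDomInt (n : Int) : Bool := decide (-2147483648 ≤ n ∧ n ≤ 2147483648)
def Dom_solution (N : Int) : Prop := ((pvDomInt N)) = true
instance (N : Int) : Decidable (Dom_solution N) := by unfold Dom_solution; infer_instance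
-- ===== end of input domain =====

-- B replaces A's two loops (digit count by repeated //10, then a power loop) with the
-- closed form 10 ** (len(str(N)) - 1); objective: idiomatic, same asymptotic cost.

-- ===== PORT A =====
-- the 'while N >= 10' loop: returns the final value of i
def solutionLoop (N : Int) (i : Int) : Int :=
  if h : 10 ≤ N then solutionLoop (PySem.Int.floordiv N 10) (i + 1) else i
termination_by N.toNat
decreasing_by
  have h2 : PySem.Int.floordiv N 10 = N / 10 :=
    PySem.Int.floordiv_eq_ediv_of_pos (by omega)
  rw [h2]; omega

def solution (N : Int) : Int :=
  if N < 10 then 0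
  else
    let i := solutionLoop N 0
    -- temp = 1; for j in range(0, i): temp *= 10
    List.foldl (fun temp _ => temp * 10) 1 (PySem.List.pyRange 0 i 1)

-- ===== PORT B =====
-- 10 ** (len(str(N)) - 1); the exponent is ≥ 1 whenever this branch runs (N ≥ 10),
-- so .toNat is exact here
def solution_alt (N : Int) : Int :=
  if N < 10 then 0
  else 10 ^ (PySem.Str.len (PySem.Int.toStr N) - 1).toNat

-- ===== PRECONDITION & SPEC =====
def Spec_solution (N : Int) (out : Int) : Prop := out = solution_alt N
instance (N : Int) (out : Int) : Decidable (Spec_solution N out) := by unfold Spec_solution; infer_instance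

-- ===== CLAIM (what is proved, stated in full; the proofs are below) =====
def Claim_equal_solution : Prop := ∀ (N : Int), Dom_solution N → Spec_solution N (solution N)

-- ===== LEMMAS AND PROOFS =====

-- number of decimal digits of n (1 for n < 10)
def dlen (n : Nat) : Nat :=
  if h : n < 10 then 1 else dlen (n / 10) + 1
termination_by n
decreasing_by omega

theorem dlen_small {n : Nat} (h : n < 10) : dlen n = 1 := by
  rw [dlen]; simp [h]

theorem dlen_big {n : Nat} (h : 10 ≤ n) : dlen n = dlen (n / 10) + 1 := by
  rw [dlen]; simp [Nat.not_lt_of_ge h]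

theorem dlen_pos (n : Nat) : 1 ≤ dlen n := by
  by_cases h : n < 10
  · rw [dlen_small h]
  · rw [dlen_big (by omega)]; omega

-- with enough fuel, toDigitsCore's output length is dlen n plus the accumulator length
theorem toDigitsCore_len : ∀ (f n : Nat) (acc : List Char), n < f →
    (Nat.toDigitsCore 10 f n acc).length = dlen n + acc.length := by
  intro f
  induction f with
  | zero => intro n acc h; omega
  | succ f ih =>
    intro n acc h
    rw [Nat.toDigitsCore]
    by_cases h10 : n < 10
    · have : n / 10 = 0 := by omega
      simp [this, dlen_small h10]; omega
    · have hne : ¬ n / 10 = 0 := by omega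
      simp only [hne, if_false]
      have hlt : n / 10 < f := by omega
      rw [ih (n / 10) (Nat.digitChar (n % 10) :: acc) hlt, dlen_big (by omega : 10 ≤ n)]
      simp only [List.length_cons]; omega

theorem toStr_len_eq_dlen (N : Int) (h : 0 ≤ N) :
    PySem.Str.len (PySem.Int.toStr N) = (dlen N.toNat : Int) := by
  have hne : ¬ N < 0 := by omega
  simp [PySem.Str.len, PySem.Int.toStr, PySem.Int.toChars, hne, Nat.toDigits,
    toDigitsCore_len (N.toNat + 1) N.toNat [] (by omega)]

-- the while loop counts dlen − 1 divisions
theorem solutionLoop_eq_aux : ∀ (m : Nat) (N : Int), N.toNat ≤ m → ∀ (i : Int), 10 ≤ N →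
    solutionLoop N i = i + (dlen N.toNat : Int) - 1 := by
  intro m
  induction m with
  | zero => intro N hm i h; omega
  | succ m ih =>
    intro N hm i h
    rw [solutionLoop]
    simp only [h, dif_pos]
    have hfd : PySem.Int.floordiv N 10 = N / 10 :=
      PySem.Int.floordiv_eq_ediv_of_pos (by omega)
    have htn : (N / 10).toNat = N.toNat / 10 := by omega
    by_cases h2 : 10 ≤ N / 10
    · rw [hfd, ih (N / 10) (by omega) (i + 1) h2, htn,
        dlen_big (n := N.toNat) (by omega)]
      push_cast; ring
    · rw [hfd, solutionLoop]
      simp only [h2, dif_neg, not_false_iff]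
      rw [dlen_big (n := N.toNat) (by omega)]
      rw [dlen_small (n := N.toNat / 10) (by omega)]
      push_cast; ring

theorem solutionLoop_eq (N : Int) (i : Int) (h : 10 ≤ N) :
    solutionLoop N i = i + (dlen N.toNat : Int) - 1 :=
  solutionLoop_eq_aux N.toNat N (le_refl _) i h

-- the for-loop: temp *= 10 repeated over a list multiplies by 10^length
theorem foldl_mul_ten {α : Type} (l : List α) : ∀ (t : Int),
    List.foldl (fun temp _ => temp * 10) t l = t * 10 ^ l.length := by
  induction l with
  | nil => intro t; simp
  | cons x xs ih => intro t; simp [ih, pow_succ]; ring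

-- ===== VERDICT (by name: the statement is the Claim_ definition above) =====
theorem solution_spec : Claim_equal_solution := by
  unfold Claim_equal_solution
  intro N _
  unfold Spec_solution solution solution_alt
  by_cases h : N < 10
  · simp [h]
  · have h10 : 10 ≤ N := by omega
    have hd2 : 2 ≤ dlen N.toNat := by
      rw [dlen_big (by omega)]; have := dlen_pos (N.toNat / 10); omega
    simp only [h, if_false]
    rw [solutionLoop_eq N 0 h10, toStr_len_eq_dlen N (by omega),
      foldl_mul_ten, PySem.List.length_pyRange_one]
    have h1 : (0 + (dlen N.toNat : Int) - 1 - 0).toNat = dlen N.toNat - 1 := by omega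
    have h2 : ((dlen N.toNat : Int) - 1).toNat = dlen N.toNat - 1 := by omega
    rw [h1, h2, one_mul]
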